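-- pv_equiv track=rewrite | github.com/ConorSheehan1/advent_of_code_2017 | day09/main.py | remove_garbage
-- ===== SOURCE A (Python) =====
-- def remove_garbage(data, keep_tag=False):
--     garbage = False
--     copy = ""
--     for char in data:
--         if char == "<":
--             garbage = True
--         # use continue top skip the step adding the current character to copy
--         # since the current char is the closing tag for garbage
--         if char == ">":
--             garbage = False
--             continue
--         if not garbage:
--             copy += char
--     return copy
-- ===== SOURCE B (Python) =====
-- import re
--
-- def remove_garbage(data, keep_tag=False):
--     # delete each garbage block '<...>' (an unterminated '<...' runs to end of string),
--     # then drop stray '>' left outside garbage (A drops those too)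
--     return re.sub(r'<[^>]*>?', '', data).replace('>', '')
-- ===== Notes on version B (the rewrite author's own statement) =====
-- stated objective: idiomatic
-- what changed: Replaced the explicit boolean-flag state machine with regex-based deletion (re.sub of the garbage pattern, then dropping stray closing angle brackets), matching A exactly including unterminated garbage at end of string.
import Mathlib
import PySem

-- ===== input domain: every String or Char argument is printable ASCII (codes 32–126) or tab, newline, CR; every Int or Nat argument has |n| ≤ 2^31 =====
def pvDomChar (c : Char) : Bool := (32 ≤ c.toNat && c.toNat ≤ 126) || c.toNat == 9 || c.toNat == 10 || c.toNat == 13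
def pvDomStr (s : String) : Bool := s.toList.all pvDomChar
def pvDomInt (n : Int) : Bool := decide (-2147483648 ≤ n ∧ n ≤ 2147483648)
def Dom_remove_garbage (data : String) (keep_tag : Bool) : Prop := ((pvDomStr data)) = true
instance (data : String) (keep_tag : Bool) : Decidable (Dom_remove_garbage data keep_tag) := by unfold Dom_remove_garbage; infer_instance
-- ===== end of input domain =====

-- B replaces A's boolean-flag state machine with regex-style pattern deletion (re.sub of '<[^>]*>?' then dropping stray '>'); objective: idiomatic.

-- ===== PORT A =====
-- A: fold over the characters carrying the (garbage, copy) state; '>' resets the flag and is skipped.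
def remove_garbage (data : String) (keep_tag : Bool) : String :=
  let st := data.toList.foldl
    (fun (st : Bool × List Char) char =>
      let garbage := if char = '<' then true else st.1
      if char = '>' then (false, st.2)
      else if garbage = false then (garbage, st.2 ++ [char]) else (garbage, st.2))
    (false, [])
  String.mk st.2

-- ===== PORT B =====
-- hand port of re.sub(r'<[^>]*>?', '', ·): on '<', delete through the next '>' (or to the end) and continue; exact for this pattern
def pvRegexSub : List Char → List Char
  | [] => []
  | c :: rest =>
    if c = '<' then pvRegexSub ((rest.dropWhile (· ≠ '>')).drop 1)
    else c :: pvRegexSub rest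
termination_by l => l.length
decreasing_by
  · simp only [List.length_cons]
    have h1 := List.length_dropWhile_le (p := (· ≠ '>')) rest
    have h2 := List.length_drop (l := rest.dropWhile (· ≠ '>')) (i := 1)
    omega
  · simp

-- .replace('>', '') ported as filtering the character out (exact: removal of every occurrence)
def remove_garbage_alt (data : String) (keep_tag : Bool) : String :=
  String.mk ((pvRegexSub data.toList).filter (· ≠ '>'))

-- ===== PRECONDITION & SPEC =====
def Spec_remove_garbage (data : String) (keep_tag : Bool) (out : String) : Prop := out = remove_garbage_alt data keep_tag
instance (data : String) (keep_tag : Bool) (out : String) : Decidable (Spec_remove_garbage data keep_tag out) := by unfold Spec_remove_garbage; infer_instance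

-- ===== CLAIM (what is proved, stated in full; the proofs are below) =====
def Claim_equal_remove_garbage : Prop := ∀ (data : String) (keep_tag : Bool), Dom_remove_garbage data keep_tag → Spec_remove_garbage data keep_tag (remove_garbage data keep_tag)

-- ===== LEMMAS AND PROOFS =====

def pvStep (st : Bool × List Char) (char : Char) : Bool × List Char :=
  let garbage := if char = '<' then true else st.1
  if char = '>' then (false, st.2)
  else if garbage = false then (garbage, st.2 ++ [char]) else (garbage, st.2)

-- loop invariant: from flag=false the fold appends B's result; from flag=true it first skips through the next '>'
theorem pv_loop_eq (l : List Char) : ∀ acc : List Char,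
    (l.foldl pvStep (false, acc)).2 = acc ++ ((pvRegexSub l).filter (· ≠ '>'))
    ∧ (l.foldl pvStep (true, acc)).2
      = acc ++ ((pvRegexSub ((l.dropWhile (· ≠ '>')).drop 1)).filter (· ≠ '>')) := by
  induction l with
  | nil => intro acc; simp [pvRegexSub]
  | cons c rest ih =>
    intro acc
    constructor
    · by_cases hlt : c = '<'
      · subst hlt
        rw [List.foldl_cons, show pvStep (false, acc) '<' = (true, acc) from rfl,
          pvRegexSub]
        exact (ih acc).2
      · by_cases hgt : c = '>'
        · subst hgt
          rw [List.foldl_cons, show pvStep (false, acc) '>' = (false, acc) from rfl,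
            pvRegexSub, if_neg (by decide)]
          simp only [List.filter_cons]
          norm_num
          simpa using (ih acc).1
        · have hstep : pvStep (false, acc) c = (false, acc ++ [c]) := by
            simp [pvStep, hlt, hgt]
          rw [List.foldl_cons, hstep, pvRegexSub, if_neg hlt]
          simp only [List.filter_cons, decide_eq_true (show c ≠ '>' from hgt)]
          rw [(ih (acc ++ [c])).1]
          simp
    · by_cases hgt : c = '>'
      · subst hgt
        rw [List.foldl_cons, show pvStep (true, acc) '>' = (false, acc) from rfl]
        simp only [List.dropWhile_cons]
        norm_num
        simpa using (ih acc).1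
      · have hstep : pvStep (true, acc) c = (true, acc) := by
          by_cases hlt : c = '<' <;> simp [pvStep, hlt, hgt]
        rw [List.foldl_cons, hstep]
        simp only [List.dropWhile_cons, decide_eq_true (show c ≠ '>' from hgt)]
        exact (ih acc).2

-- ===== VERDICT (by name: the statement is the Claim_ definition above) =====
theorem remove_garbage_spec : Claim_equal_remove_garbage := by
  intro data keep_tag _
  show remove_garbage data keep_tag = remove_garbage_alt data keep_tag
  unfold remove_garbage remove_garbage_alt
  exact congrArg String.mk (((pv_loop_eq data.toList []).1).trans (List.nil_append _))
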